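-- pv_equiv track=rewrite | github.com/OlgaShep/web_lab_aib_frontend | labs/Lab_12_python_intro/solution/lab12_1.py | task_horse
-- ===== SOURCE A (Python) =====
-- def task_horse(N, M):
--     dp = [[0] * M for _ in range(N)]
--     dp[0][0] = 1
--
--     for i in range(N):
--         for j in range(M):
--             if i + 1 < N and j + 2 < M:
--                 dp[i+1][j+2] += dp[i][j]
--             if i + 2 < N and j + 1 < M:
--                 dp[i+2][j+1] += dp[i][j]
--
--     return dp[N-1][M-1]
-- ===== SOURCE B (Python) =====
-- def task_horse(N, M):
--     # a moves of (1,2) and b moves of (2,1) must satisfy a+2b = N-1, 2a+b = M-1;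
--     # number of orderings is C(a+b, a), computed by a multiplicative loop.
--     i, j = N - 1, M - 1
--     if (i + j) % 3:
--         return 0
--     a = (2 * j - i) // 3
--     b = (2 * i - j) // 3
--     if a < 0 or b < 0:
--         return 0
--     c = 1
--     for k in range(1, a + 1):
--         c = c * (b + k) // k
--     return c
-- ===== Notes on version B (the rewrite author's own statement) =====
-- stated objective: faster
-- what changed: Replaced the O(N*M) table-filling DP with a closed form: solve a+2b=N-1, 2a+b=M-1 for the move counts and return the binomial coefficient C(a+b,a) via an O(min(N,M)) multiplicative loop, 0 when no nonnegative solution exists.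
import Mathlib
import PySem

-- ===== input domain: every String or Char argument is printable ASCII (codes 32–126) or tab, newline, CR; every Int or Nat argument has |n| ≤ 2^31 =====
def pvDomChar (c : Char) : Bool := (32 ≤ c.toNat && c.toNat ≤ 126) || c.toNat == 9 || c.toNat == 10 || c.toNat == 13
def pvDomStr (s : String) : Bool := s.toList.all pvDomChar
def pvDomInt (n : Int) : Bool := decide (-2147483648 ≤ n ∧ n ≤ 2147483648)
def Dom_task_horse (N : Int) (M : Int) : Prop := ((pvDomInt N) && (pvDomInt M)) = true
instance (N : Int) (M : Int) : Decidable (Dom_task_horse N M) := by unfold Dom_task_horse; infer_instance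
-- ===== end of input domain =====

-- B replaces A's O(N*M) table DP by the closed form C(a+b,a) for the move counts a,b solving
-- a+2b=N-1, 2a+b=M-1 (0 if no nonnegative solution), computed by a short multiplicative loop.

-- ===== PORT A =====
-- a[i] with a default (Python lists are arrays; all accesses are in range under the loop guards / Pre_)
def agetD {α : Type} (a : Array α) (i : Nat) (d : α) : α := a[i]?.getD d
-- dp[i][j] read
def mget (dp : Array (Array Int)) (i j : Nat) : Int := agetD (agetD dp i #[]) j 0
-- dp[i][j] = v (exact while i,j in range, which Pre_ and the guards ensure)
def mset (dp : Array (Array Int)) (i j : Nat) (v : Int) : Array (Array Int) :=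
  dp.modify i (fun row => row.setIfInBounds j v)
-- dp[i][j] += v (exact while i,j in range, which the guards ensure)
def madd (dp : Array (Array Int)) (i j : Nat) (v : Int) : Array (Array Int) :=
  dp.modify i (fun row => row.modify j (· + v))

-- body of the inner 'for j in range(M)' loop
def innerStep (N M i : Int) (dp : Array (Array Int)) (j : Int) : Array (Array Int) :=
  let dp := if i + 1 < N ∧ j + 2 < M then madd dp (i+1).toNat (j+2).toNat (mget dp i.toNat j.toNat) else dp
  if i + 2 < N ∧ j + 1 < M then madd dp (i+2).toNat (j+1).toNat (mget dp i.toNat j.toNat) else dp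

-- body of the outer 'for i in range(N)' loop
def outerStep (N M : Int) (dp : Array (Array Int)) (i : Int) : Array (Array Int) :=
  (PySem.List.pyRange 0 M 1).foldl (innerStep N M i) dp

def task_horse (N : Int) (M : Int) : Int :=
  let dp0 : Array (Array Int) := ((PySem.List.pyRange 0 N 1).map (fun _ => Array.replicate M.toNat (0:Int))).toArray
  let dp1 := mset dp0 0 0 1
  let dp2 := (PySem.List.pyRange 0 N 1).foldl (outerStep N M) dp1
  mget dp2 (N-1).toNat (M-1).toNat

-- ===== PORT B =====
def task_horse_alt (N : Int) (M : Int) : Int :=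
  let i := N - 1
  let j := M - 1
  if PySem.Int.mod (i + j) 3 ≠ 0 then 0
  else
    let a := PySem.Int.floordiv (2*j - i) 3
    let b := PySem.Int.floordiv (2*i - j) 3
    if a < 0 ∨ b < 0 then 0
    else (PySem.List.pyRange 1 (a+1) 1).foldl (fun c k => PySem.Int.floordiv (c * (b + k)) k) 1

-- ===== PRECONDITION & SPEC =====
-- A indexes dp[0][0] into the N×M table, so it raises IndexError unless both dimensions are ≥ 1.
def Pre_task_horse (N : Int) (M : Int) : Prop := 1 ≤ N ∧ 1 ≤ M
instance (N : Int) (M : Int) : Decidable (Pre_task_horse N M) := by unfold Pre_task_horse; infer_instance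
def pvWitness_task_horse : Int × Int := (2, 3)

def Spec_task_horse (N : Int) (M : Int) (out : Int) : Prop := out = task_horse_alt N M
instance (N : Int) (M : Int) (out : Int) : Decidable (Spec_task_horse N M out) := by unfold Spec_task_horse; infer_instance

-- ===== CLAIM (what is proved, stated in full; the proofs are below) =====
def Claim_equal_task_horse : Prop := ∀ (N : Int) (M : Int), Dom_task_horse N M → Pre_task_horse N M → Spec_task_horse N M (task_horse N M)

-- ===== LEMMAS AND PROOFS =====

-- the closed-form path count, mirrored from B's branch structure
def gcf (i j : Int) : Int :=
  if PySem.Int.mod (i + j) 3 ≠ 0 then 0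
  else if PySem.Int.floordiv (2*j - i) 3 < 0 ∨ PySem.Int.floordiv (2*i - j) 3 < 0 then 0
  else ((PySem.Int.floordiv (2*j - i) 3 + PySem.Int.floordiv (2*i - j) 3).toNat.choose
        (PySem.Int.floordiv (2*j - i) 3).toNat : Int)

-- the multiplicative loop computes the binomial coefficient
lemma chooseLoop (A : Nat) : ∀ (b : Int), 0 ≤ b →
    (PySem.List.pyRange 1 ((A : Int) + 1) 1).foldl
      (fun c k => PySem.Int.floordiv (c * (b + k)) k) 1
      = ((A + b.toNat).choose A : Int) := by
  induction A with
  | zero =>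
    intro b hb
    rw [show ((0:Nat):Int) + 1 = 1 by norm_num, PySem.List.pyRange_one_eq_nil (by omega)]
    simp
  | succ A ih =>
    intro b hb
    obtain ⟨b', rfl⟩ := Int.eq_ofNat_of_zero_le hb
    rw [show (((A+1:Nat)):Int) + 1 = ((A:Int) + 1) + 1 by push_cast; ring,
        PySem.List.pyRange_one_succ_right (by omega), List.foldl_append]
    have ihb := ih (b' : Int) (by positivity)
    simp only [Int.toNat_natCast] at ihb ⊢
    rw [ihb]
    simp only [List.foldl_cons, List.foldl_nil]
    rw [show A + 1 + b' = (A + b') + 1 from by omega]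
    have hp := Nat.succ_mul_choose_eq (A + b') A
    simp only [Nat.succ_eq_add_one] at hp
    have key2 : (A + b').choose A * (b' + (A + 1)) = ((A + b') + 1).choose (A + 1) * (A + 1) := by
      calc (A + b').choose A * (b' + (A + 1)) = (A + b' + 1) * ((A + b').choose A) := by ring
        _ = ((A + b') + 1).choose (A + 1) * (A + 1) := hp
    have harg : (((A + b').choose A : Int)) * ((b' : Int) + ((A:Int) + 1))
        = ((((A + b') + 1).choose (A + 1) * (A + 1) : Nat) : Int) := by exact_mod_cast key2
    rw [harg, PySem.Int.floordiv_eq_ediv_of_pos (by omega : (0:Int) < (A:Int) + 1)]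
    push_cast
    rw [Int.mul_ediv_cancel _ (by omega : ((A:Int) + 1) ≠ 0)]

lemma alt_eq_gcf (N M : Int) : task_horse_alt N M = gcf (N-1) (M-1) := by
  simp only [task_horse_alt, gcf]
  by_cases h1 : PySem.Int.mod (N - 1 + (M - 1)) 3 ≠ 0
  · rw [if_pos h1, if_pos h1]
  · rw [if_neg h1, if_neg h1]
    by_cases h2 : PySem.Int.floordiv (2*(M-1) - (N-1)) 3 < 0 ∨ PySem.Int.floordiv (2*(N-1) - (M-1)) 3 < 0
    · rw [if_pos h2, if_pos h2]
    · rw [if_neg h2, if_neg h2]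
      have ha0 : 0 ≤ PySem.Int.floordiv (2*(M-1) - (N-1)) 3 := by omega
      have hb0 : 0 ≤ PySem.Int.floordiv (2*(N-1) - (M-1)) 3 := by omega
      have ha : PySem.Int.floordiv (2*(M-1) - (N-1)) 3
          = (((PySem.Int.floordiv (2*(M-1) - (N-1)) 3).toNat : Nat) : Int) := by omega
      rw [ha]
      rw [chooseLoop _ _ hb0]
      congr 2 <;> omega

lemma gcf_neg {i j : Int} (h : i < 0 ∨ j < 0) : gcf i j = 0 := by
  unfold gcf
  rw [PySem.Int.mod_eq_emod_of_pos (by norm_num), PySem.Int.floordiv_eq_ediv_of_pos (by norm_num),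
      PySem.Int.floordiv_eq_ediv_of_pos (by norm_num)]
  by_cases hm : (i + j) % 3 = 0
  · have hd : (2*j - i) / 3 < 0 ∨ (2*i - j) / 3 < 0 := by omega
    simp [hm, hd]
  · simp [hm]

lemma gcf_zero_zero : gcf 0 0 = 1 := by
  decide

lemma choose_branch (a b : Int) (h : ¬(a = 0 ∧ b = 0)) :
    (if a < 0 ∨ b < 0 then 0 else ((a + b).toNat.choose a.toNat : Int)) =
      (if a - 1 < 0 ∨ b < 0 then 0 else ((a - 1 + b).toNat.choose (a - 1).toNat : Int)) +
      (if a < 0 ∨ b - 1 < 0 then 0 else ((a + (b - 1)).toNat.choose a.toNat : Int)) := by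
  by_cases hab : a < 0 ∨ b < 0
  · rw [if_pos hab, if_pos (by omega), if_pos (by omega)]; norm_num
  · have ha0 : 0 ≤ a := by omega
    have hb0 : 0 ≤ b := by omega
    rw [if_neg hab]
    by_cases haz : a = 0
    · subst haz
      rw [if_pos (by omega), if_neg (by omega)]
      have e1 : ((0:Int) + b).toNat = b.toNat := by omega
      have e2 : ((0:Int) + (b - 1)).toNat = b.toNat - 1 := by omega
      rw [e1, e2]
      simp
    · by_cases hbz : b = 0
      · subst hbz
        rw [if_neg (by omega), if_pos (by omega)]
        have e1 : (a + (0:Int)).toNat = a.toNat := by omega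
        have e2 : (a - 1 + (0:Int)).toNat = a.toNat - 1 := by omega
        have e3 : ((a:Int) - 1).toNat = a.toNat - 1 := by omega
        rw [e1, e2, e3]
        simp [Nat.choose_self]
      · obtain ⟨A, hA⟩ : ∃ A : Nat, a.toNat = A + 1 := ⟨a.toNat - 1, by omega⟩
        rw [if_neg (by omega), if_neg (by omega)]
        have e0 : (a + b).toNat = (A + b.toNat) + 1 := by omega
        have e1 : (a - 1 + b).toNat = A + b.toNat := by omega
        have e2 : ((a:Int) - 1).toNat = A := by omega
        have e3 : (a + (b - 1)).toNat = A + b.toNat := by omega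
        rw [e0, e1, e2, e3, hA]
        have hp := Nat.choose_succ_succ (A + b.toNat) A
        simp only [Nat.succ_eq_add_one] at hp
        exact_mod_cast hp

lemma gcf_rec (i j : Int) (h : ¬(i = 0 ∧ j = 0)) :
    gcf i j = gcf (i-1) (j-2) + gcf (i-2) (j-1) := by
  unfold gcf
  simp only [PySem.Int.mod_eq_emod_of_pos (by norm_num : (0:Int) < 3),
             PySem.Int.floordiv_eq_ediv_of_pos (by norm_num : (0:Int) < 3)]
  by_cases h3 : (i + j) % 3 = 0
  · have e1 : (i - 1 + (j - 2)) % 3 = 0 := by omega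
    have e2 : (i - 2 + (j - 1)) % 3 = 0 := by omega
    simp only [h3, e1, e2, ne_eq, not_true_eq_false, if_false]
    have pa1 : (2*(j-2) - (i-1)) / 3 = (2*j - i) / 3 - 1 := by omega
    have pb1 : (2*(i-1) - (j-2)) / 3 = (2*i - j) / 3 := by omega
    have pa2 : (2*(j-1) - (i-2)) / 3 = (2*j - i) / 3 := by omega
    have pb2 : (2*(i-2) - (j-1)) / 3 = (2*i - j) / 3 - 1 := by omega
    rw [pa1, pb1, pa2, pb2]
    have hne : ¬((2*j - i) / 3 = 0 ∧ (2*i - j) / 3 = 0) := by omega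
    exact choose_branch _ _ hne
  · have e1 : (i - 1 + (j - 2)) % 3 ≠ 0 := by omega
    have e2 : (i - 2 + (j - 1)) % 3 ≠ 0 := by omega
    simp [h3, e1, e2]

-- contributions already pushed into cell (r,c) after the first k cells (row-major) are processed
def pc (M k r c : Int) : Int :=
  (if 1 ≤ r ∧ 2 ≤ c ∧ (r-1)*M + (c-2) < k then gcf (r-1) (c-2) else 0)
  + (if 2 ≤ r ∧ 1 ≤ c ∧ (r-2)*M + (c-1) < k then gcf (r-2) (c-1) else 0)

def base (r c : Int) : Int := if r = 0 ∧ c = 0 then 1 else 0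

def DPInv (N M k : Int) (dp : Array (Array Int)) : Prop :=
  dp.size = N.toNat ∧ (∀ r : Nat, r < N.toNat → (agetD dp r #[]).size = M.toNat) ∧
  ∀ r c : Int, 0 ≤ r → r < N → 0 ≤ c → c < M →
    mget dp r.toNat c.toNat = base r c + pc M k r c

lemma agetD_modify {α : Type} (a : Array α) (i j : Nat) (f : α → α) (d : α) :
    agetD (a.modify i f) j d = if i = j ∧ j < a.size then f (agetD a j d) else agetD a j d := by
  unfold agetD
  rw [Array.getElem?_modify]
  by_cases h : i = j
  · subst h
    by_cases hj : i < a.size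
    · rw [Array.getElem?_eq_getElem hj]
      simp [hj]
    · rw [Array.getElem?_eq_none (by omega)]
      simp [hj]
  · simp [h]

lemma mget_madd (dp : Array (Array Int)) (i j r c : Nat) (v : Int) :
    mget (madd dp i j v) r c =
      if i = r ∧ j = c ∧ r < dp.size ∧ c < (agetD dp i #[]).size
      then mget dp r c + v else mget dp r c := by
  unfold mget madd
  rw [agetD_modify]
  by_cases h1 : i = r ∧ r < dp.size
  · rw [if_pos h1]
    obtain ⟨hi, hr⟩ := h1
    subst hi
    rw [agetD_modify]
    by_cases h2 : j = c ∧ c < (agetD dp i #[]).size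
    · rw [if_pos h2, if_pos ⟨rfl, h2.1, hr, h2.2⟩]
    · rw [if_neg h2, if_neg (by tauto)]
  · rw [if_neg h1, if_neg (by tauto)]

-- row-major position is injective on the grid
lemma pos_inj {M a b a' b' : Int} (hM : 0 < M) (hb : 0 ≤ b) (hbM : b < M)
    (hb' : 0 ≤ b') (hbM' : b' < M) (h : a*M + b = a'*M + b') : a = a' ∧ b = b' := by
  have ha : a = a' := by
    rcases lt_trichotomy a a' with hlt | he | hgt
    · exfalso; nlinarith
    · exact he
    · exfalso; nlinarith
  subst ha
  exact ⟨rfl, by omega⟩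

-- once both predecessors of (r,c) are counted, the cell holds its final value
lemma base_pc_eq_gcf (M k r c : Int) (hr : 0 ≤ r) (hc : 0 ≤ c)
    (hk1 : 1 ≤ r → 2 ≤ c → (r-1)*M + (c-2) < k)
    (hk2 : 2 ≤ r → 1 ≤ c → (r-2)*M + (c-1) < k) :
    base r c + pc M k r c = gcf r c := by
  by_cases h0 : r = 0 ∧ c = 0
  · obtain ⟨rfl, rfl⟩ := h0
    simp [base, pc, gcf_zero_zero]
  · rw [gcf_rec r c h0]
    unfold base pc
    rw [if_neg h0]
    have e1 : (if 1 ≤ r ∧ 2 ≤ c ∧ (r-1)*M + (c-2) < k then gcf (r-1) (c-2) else 0) = gcf (r-1) (c-2) := by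
      by_cases hc1 : 1 ≤ r ∧ 2 ≤ c
      · rw [if_pos ⟨hc1.1, hc1.2, hk1 hc1.1 hc1.2⟩]
      · rw [if_neg (by tauto), gcf_neg (by omega)]
    have e2 : (if 2 ≤ r ∧ 1 ≤ c ∧ (r-2)*M + (c-1) < k then gcf (r-2) (c-1) else 0) = gcf (r-2) (c-1) := by
      by_cases hc2 : 2 ≤ r ∧ 1 ≤ c
      · rw [if_pos ⟨hc2.1, hc2.2, hk2 hc2.1 hc2.2⟩]
      · rw [if_neg (by tauto), gcf_neg (by omega)]
    rw [e1, e2]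
    ring

lemma length_madd (dp : Array (Array Int)) (i j : Nat) (v : Int) :
    (madd dp i j v).size = dp.size := by
  unfold madd; exact Array.size_modify

lemma row_length_madd (dp : Array (Array Int)) (i j : Nat) (v : Int) (r : Nat) :
    (agetD (madd dp i j v) r #[]).size = (agetD dp r #[]).size := by
  unfold madd
  rw [agetD_modify]
  split_ifs with h
  · exact Array.size_modify
  · rfl

lemma pc_succ (M i j r c : Int) (hM : 0 < M) (hi0 : 0 ≤ i) (hj0 : 0 ≤ j) (hjM : j < M)
    (hc : 0 ≤ c) (hcM : c < M) :
    pc M (i*M + j + 1) r c = pc M (i*M + j) r c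
      + (if r = i + 1 ∧ c = j + 2 then gcf (r-1) (c-2) else 0)
      + (if r = i + 2 ∧ c = j + 1 then gcf (r-2) (c-1) else 0) := by
  unfold pc
  have part1 : (if 1 ≤ r ∧ 2 ≤ c ∧ (r-1)*M + (c-2) < i*M + j + 1 then gcf (r-1) (c-2) else 0)
      = (if 1 ≤ r ∧ 2 ≤ c ∧ (r-1)*M + (c-2) < i*M + j then gcf (r-1) (c-2) else 0)
        + (if r = i + 1 ∧ c = j + 2 then gcf (r-1) (c-2) else 0) := by
    by_cases hrc : r = i + 1 ∧ c = j + 2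
    · obtain ⟨rfl, rfl⟩ := hrc
      have hpos : (i + 1 - 1)*M + (j + 2 - 2) = i*M + j := by ring
      rw [if_pos ⟨by omega, by omega, by rw [hpos]; omega⟩,
          if_neg (by rw [hpos]; exact fun h => absurd h.2.2 (by omega)),
          if_pos ⟨rfl, rfl⟩]
      ring
    · rw [if_neg hrc, add_zero]
      by_cases hg : 1 ≤ r ∧ 2 ≤ c
      · have hne : (r-1)*M + (c-2) ≠ i*M + j := by
          intro he
          obtain ⟨h1, h2⟩ := pos_inj hM (by omega) (by omega) hj0 hjM he
          exact hrc ⟨by omega, by omega⟩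
        have hiff : ((r-1)*M + (c-2) < i*M + j + 1) ↔ ((r-1)*M + (c-2) < i*M + j) :=
          ⟨fun h => lt_of_le_of_ne (Int.lt_add_one_iff.mp h) hne, fun h => lt_trans h (by omega)⟩
        simp only [hg.1, hg.2, true_and]
        rw [if_congr hiff rfl rfl]
      · rw [if_neg (by tauto), if_neg (by tauto)]
  have part2 : (if 2 ≤ r ∧ 1 ≤ c ∧ (r-2)*M + (c-1) < i*M + j + 1 then gcf (r-2) (c-1) else 0)
      = (if 2 ≤ r ∧ 1 ≤ c ∧ (r-2)*M + (c-1) < i*M + j then gcf (r-2) (c-1) else 0)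
        + (if r = i + 2 ∧ c = j + 1 then gcf (r-2) (c-1) else 0) := by
    by_cases hrc : r = i + 2 ∧ c = j + 1
    · obtain ⟨rfl, rfl⟩ := hrc
      have hpos : (i + 2 - 2)*M + (j + 1 - 1) = i*M + j := by ring
      rw [if_pos ⟨by omega, by omega, by rw [hpos]; omega⟩,
          if_neg (by rw [hpos]; exact fun h => absurd h.2.2 (by omega)),
          if_pos ⟨rfl, rfl⟩]
      ring
    · rw [if_neg hrc, add_zero]
      by_cases hg : 2 ≤ r ∧ 1 ≤ c
      · have hne : (r-2)*M + (c-1) ≠ i*M + j := by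
          intro he
          obtain ⟨h1, h2⟩ := pos_inj hM (by omega) (by omega) hj0 hjM he
          exact hrc ⟨by omega, by omega⟩
        have hiff : ((r-2)*M + (c-1) < i*M + j + 1) ↔ ((r-2)*M + (c-1) < i*M + j) :=
          ⟨fun h => lt_of_le_of_ne (Int.lt_add_one_iff.mp h) hne, fun h => lt_trans h (by omega)⟩
        simp only [hg.1, hg.2, true_and]
        rw [if_congr hiff rfl rfl]
      · rw [if_neg (by tauto), if_neg (by tauto)]
  rw [part1, part2]
  ring

lemma step_inv (N M i j : Int) (hM : 1 ≤ M) (hi0 : 0 ≤ i) (hiN : i < N)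
    (hj0 : 0 ≤ j) (hjM : j < M) (dp : Array (Array Int)) (h : DPInv N M (i*M + j) dp) :
    DPInv N M (i*M + j + 1) (innerStep N M i dp j) := by
  obtain ⟨hlen, hrows, hval⟩ := h
  have hMpos : (0:Int) < M := by omega
  have hread : mget dp i.toNat j.toNat = gcf i j := by
    rw [hval i j hi0 hiN hj0 hjM]
    apply base_pc_eq_gcf M (i*M + j) i j hi0 hj0
    · intro _ _
      have e : (i-1)*M = i*M - M := by ring
      linarith
    · intro _ _
      have e : (i-2)*M = i*M - 2*M := by ring
      linarith
  simp only [innerStep]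
  set dpa := if i + 1 < N ∧ j + 2 < M then madd dp (i+1).toNat (j+2).toNat (mget dp i.toNat j.toNat) else dp with hdpa
  have hlen_a : dpa.size = N.toNat := by
    rw [hdpa]; split_ifs
    · rw [length_madd]; exact hlen
    · exact hlen
  have hrows_a : ∀ r : Nat, r < N.toNat → (agetD dpa r #[]).size = M.toNat := by
    intro r hr; rw [hdpa]; split_ifs
    · rw [row_length_madd]; exact hrows r hr
    · exact hrows r hr
  have hval_a : ∀ r c : Int, 0 ≤ r → r < N → 0 ≤ c → c < M →
      mget dpa r.toNat c.toNat = mget dp r.toNat c.toNat + (if r = i + 1 ∧ c = j + 2 then gcf i j else 0) := by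
    intro r c hr0 hrN hc0 hcM
    rw [hdpa]
    by_cases hC1 : i + 1 < N ∧ j + 2 < M
    · rw [if_pos hC1, mget_madd]
      by_cases hrc : r = i + 1 ∧ c = j + 2
      · obtain ⟨rfl, rfl⟩ := hrc
        rw [if_pos ⟨by omega, by omega, by rw [hlen]; omega, by
          rw [hrows (i+1).toNat (by omega)]; omega⟩, if_pos ⟨rfl, rfl⟩, hread]
      · rw [if_neg (fun hcond => hrc ⟨by omega, by omega⟩), if_neg hrc, add_zero]
    · rw [if_neg hC1]
      have hno : ¬(r = i + 1 ∧ c = j + 2) := by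
        rintro ⟨rfl, rfl⟩; exact hC1 ⟨by omega, by omega⟩
      rw [if_neg hno, add_zero]
  have hread_a : mget dpa i.toNat j.toNat = gcf i j := by
    rw [hval_a i j hi0 hiN hj0 hjM, if_neg (by rintro ⟨h1, _⟩; omega), add_zero, hread]
  refine ⟨?_, ?_, ?_⟩
  · split_ifs
    · rw [length_madd]; exact hlen_a
    · exact hlen_a
  · intro r hr; split_ifs
    · rw [row_length_madd]; exact hrows_a r hr
    · exact hrows_a r hr
  · intro r c hr0 hrN hc0 hcM
    have final_val : mget (if i + 2 < N ∧ j + 1 < M then madd dpa (i+2).toNat (j+1).toNat (mget dpa i.toNat j.toNat) else dpa) r.toNat c.toNat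
        = mget dpa r.toNat c.toNat + (if r = i + 2 ∧ c = j + 1 then gcf i j else 0) := by
      by_cases hC2 : i + 2 < N ∧ j + 1 < M
      · rw [if_pos hC2, mget_madd]
        by_cases hrc : r = i + 2 ∧ c = j + 1
        · obtain ⟨rfl, rfl⟩ := hrc
          rw [if_pos ⟨by omega, by omega, by rw [hlen_a]; omega, by
            rw [hrows_a (i+2).toNat (by omega)]; omega⟩, if_pos ⟨rfl, rfl⟩, hread_a]
        · rw [if_neg (fun hcond => hrc ⟨by omega, by omega⟩), if_neg hrc, add_zero]
      · rw [if_neg hC2]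
        have hno : ¬(r = i + 2 ∧ c = j + 1) := by
          rintro ⟨rfl, rfl⟩; exact hC2 ⟨by omega, by omega⟩
        rw [if_neg hno, add_zero]
    rw [final_val, hval_a r c hr0 hrN hc0 hcM, hval r c hr0 hrN hc0 hcM,
        pc_succ M i j r c hMpos hi0 hj0 hjM hc0 hcM]
    have d1 : (if r = i + 1 ∧ c = j + 2 then gcf (r-1) (c-2) else 0)
        = (if r = i + 1 ∧ c = j + 2 then gcf i j else 0) := by
      split_ifs with hh
      · obtain ⟨rfl, rfl⟩ := hh; congr 1 <;> ring
      · rfl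
    have d2 : (if r = i + 2 ∧ c = j + 1 then gcf (r-2) (c-1) else 0)
        = (if r = i + 2 ∧ c = j + 1 then gcf i j else 0) := by
      split_ifs with hh
      · obtain ⟨rfl, rfl⟩ := hh; congr 1 <;> ring
      · rfl
    rw [d1, d2]
    ring

lemma inner_inv (N M i : Int) (hM : 1 ≤ M) (hi0 : 0 ≤ i) (hiN : i < N) :
    ∀ (t : Nat) (j0 : Int), 0 ≤ j0 → j0 + t = M → ∀ dp, DPInv N M (i*M + j0) dp →
    DPInv N M (i*M + M) ((PySem.List.pyRange j0 M 1).foldl (innerStep N M i) dp) := by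
  intro t
  induction t with
  | zero =>
    intro j0 h0 hsum dp hdp
    have hj : j0 = M := by omega
    subst hj
    rw [PySem.List.pyRange_one_eq_nil le_rfl, List.foldl_nil]
    exact hdp
  | succ t ih =>
    intro j0 h0 hsum dp hdp
    have hlt : j0 < M := by omega
    rw [PySem.List.pyRange_one_cons hlt, List.foldl_cons]
    have hstep := step_inv N M i j0 hM hi0 hiN h0 hlt dp hdp
    have hnext : DPInv N M (i*M + (j0 + 1)) (innerStep N M i dp j0) := by
      rw [show i*M + (j0 + 1) = i*M + j0 + 1 from by ring]
      exact hstep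
    exact ih (j0 + 1) (by omega) (by omega) _ hnext

lemma outer_inv (N M : Int) (hM : 1 ≤ M) :
    ∀ (t : Nat) (i0 : Int), 0 ≤ i0 → i0 + t = N → ∀ dp, DPInv N M (i0*M) dp →
    DPInv N M (N*M) ((PySem.List.pyRange i0 N 1).foldl (outerStep N M) dp) := by
  intro t
  induction t with
  | zero =>
    intro i0 h0 hsum dp hdp
    have hi : i0 = N := by omega
    subst hi
    rw [PySem.List.pyRange_one_eq_nil le_rfl, List.foldl_nil]
    exact hdp
  | succ t ih =>
    intro i0 h0 hsum dp hdp
    have hlt : i0 < N := by omega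
    rw [PySem.List.pyRange_one_cons hlt, List.foldl_cons]
    have hstep := inner_inv N M i0 hM h0 hlt M.toNat 0 le_rfl (by omega) dp
      (by rw [show i0*M + 0 = i0*M from by ring]; exact hdp)
    have hnext : DPInv N M ((i0 + 1)*M) (outerStep N M dp i0) := by
      rw [show (i0 + 1)*M = i0*M + M from by ring]
      exact hstep
    exact ih (i0 + 1) (by omega) (by omega) _ hnext

lemma init_inv (N M : Int) (hN : 1 ≤ N) (hM : 1 ≤ M) :
    DPInv N M 0 (mset (((PySem.List.pyRange 0 N 1).map (fun _ => Array.replicate M.toNat (0:Int))).toArray) 0 0 1) := by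
  set dp0 := ((PySem.List.pyRange 0 N 1).map (fun _ => Array.replicate M.toNat (0:Int))).toArray with hdp0
  have hlen0 : dp0.size = N.toNat := by
    rw [hdp0, List.size_toArray, List.length_map, PySem.List.length_pyRange_one]
    omega
  have hrow0 : ∀ r : Nat, r < N.toNat → agetD dp0 r #[] = Array.replicate M.toNat (0:Int) := by
    intro r hr
    rw [hdp0]
    unfold agetD
    rw [List.getElem?_toArray, List.getElem?_map,
        List.getElem?_eq_getElem (by rw [PySem.List.length_pyRange_one]; omega)]
    rfl
  unfold mset
  have hrow1 : ∀ r : Nat, r < N.toNat →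
      agetD (dp0.modify 0 (fun row => row.setIfInBounds 0 1)) r #[]
        = if r = 0 then (Array.replicate M.toNat (0:Int)).setIfInBounds 0 1 else Array.replicate M.toNat 0 := by
    intro r hr
    rw [agetD_modify]
    by_cases hr0 : r = 0
    · subst hr0
      rw [if_pos ⟨rfl, by rw [hlen0]; omega⟩, hrow0 0 (by omega), if_pos rfl]
    · rw [if_neg (by tauto), hrow0 r hr, if_neg hr0]
  refine ⟨?_, ?_, ?_⟩
  · rw [Array.size_modify]; exact hlen0
  · intro r hr
    rw [hrow1 r hr]
    split_ifs <;> simp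
  · intro r c hr0 hrN hc0 hcM
    have hpc0 : pc M 0 r c = 0 := by
      unfold pc
      rw [if_neg (by
            rintro ⟨h1, h2, h3⟩
            have := mul_nonneg (by omega : (0:Int) ≤ r - 1) (by omega : (0:Int) ≤ M)
            linarith),
          if_neg (by
            rintro ⟨h1, h2, h3⟩
            have := mul_nonneg (by omega : (0:Int) ≤ r - 2) (by omega : (0:Int) ≤ M)
            linarith)]
      norm_num
    rw [hpc0, add_zero]
    unfold mget
    rw [hrow1 r.toNat (by omega)]
    by_cases hr' : r = 0
    · subst hr'
      rw [if_pos (by omega)]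
      unfold agetD
      rw [Array.getElem?_setIfInBounds]
      by_cases hc' : c = 0
      · subst hc'
        rw [if_pos (by omega)]
        rw [if_pos (by rw [Array.size_replicate]; omega)]
        simp [base]
      · rw [if_neg (by omega), Array.getElem?_replicate, if_pos (by omega)]
        simp [base, hc']
    · rw [if_neg (by omega)]
      unfold agetD
      rw [Array.getElem?_replicate, if_pos (by omega)]
      simp [base, hr']

lemma a_eq_gcf (N M : Int) (hN : 1 ≤ N) (hM : 1 ≤ M) :
    task_horse N M = gcf (N-1) (M-1) := by
  simp only [task_horse]
  have h0 := init_inv N M hN hM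
  have h1 := outer_inv N M hM N.toNat 0 le_rfl (by omega) _
    (by rw [show (0:Int)*M = 0 from zero_mul M]; exact h0)
  obtain ⟨hl, hr, hv⟩ := h1
  rw [hv (N-1) (M-1) (by omega) (by omega) (by omega) (by omega)]
  apply base_pc_eq_gcf M (N*M) (N-1) (M-1) (by omega) (by omega)
  · intro h1' h2'
    have e : (N-1-1)*M = N*M - 2*M := by ring
    linarith
  · intro h1' h2'
    have e : (N-1-2)*M = N*M - 3*M := by ring
    linarith

-- ===== VERDICT (by name: the statement is the Claim_ definition above) =====
theorem task_horse_spec : Claim_equal_task_horse := by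
  intro N M _ hPre
  unfold Spec_task_horse
  rw [a_eq_gcf N M hPre.1 hPre.2, alt_eq_gcf]
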